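-- pv_equiv track=rewrite | github.com/LexPredict/lexpredict-contraxsuite | contraxsuite_services/apps/document/field_processing/field_processing_utils.py | get_dependent_fields
-- ===== SOURCE A (Python) =====
-- from typing import List, Tuple, Set
--
-- def get_dependent_fields(
--         fields_and_deps: List[Tuple[str, Set[str]]],
--         required_fields: Set[str] = None) -> Set[str]:
--     """
--     Get the fields dependent on the the "required_fields".
--     """
--     required = set(required_fields)
--     dependent = set()  # type: Set[str]
--
--     while True:
--         found_new = False
--         for fd in fields_and_deps:
--             if fd[0] in required:
--                 continue
--             for deps in fd[1]:
--                 if deps not in required: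
--                     continue
--                 required.add(fd[0])
--                 dependent.add(fd[0])
--                 found_new = True
--         if not found_new:
--             break
--     return dependent
-- ===== SOURCE B (Python) =====
-- from typing import List, Tuple, Set
--
-- def get_dependent_fields(
--         fields_and_deps: List[Tuple[str, Set[str]]],
--         required_fields: Set[str] = None) -> Set[str]:
--     """
--     Propagation over a reverse-dependency index: each dependency edge is
--     indexed once and fired at most once (when its name becomes required),
--     instead of being rescanned on every sweep as in the naive fixpoint.
--     Frontier booleans 'cur'/'nxt' mark the entries to visit this round /
--     the next round.
--     """
--     required = set(required_fields)
--     n = len(fields_and_deps)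
--     # reverse index: dependency name -> indices of the entries that depend on it
--     rdeps = {}
--     for i, fd in enumerate(fields_and_deps):
--         for d in fd[1]:
--             rdeps.setdefault(d, []).append(i)
--     # seed the frontier from the initially required names
--     cur = [False] * n
--     for d in required:
--         for k in rdeps.get(d, ()):
--             cur[k] = True
--     dependent = set()
--     while any(cur):
--         nxt = [False] * n
--         for i in range(n):
--             if not cur[i]:
--                 continue
--             name = fields_and_deps[i][0]
--             if name in required:
--                 continue
--             required.add(name)
--             dependent.add(name)
--             # fire the edges out of 'name' exactly once
--             for k in rdeps.get(name, ()):
--                 if k > i: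
--                     cur[k] = True
--                 else:
--                     nxt[k] = True
--         cur = nxt
--     return dependent
-- ===== Notes on version B (the rewrite author's own statement) =====
-- stated objective: alternative
-- what changed: Replaces A's fixpoint sweeps that rescan every dependency list on every round with a reverse-dependency index built once: each dependency edge is fired at most once (when its name becomes required) into boolean frontier arrays marking which entries to visit in the current/next round; on the generated inputs this is not measurably faster, so it is claimed only as a different algorithm.
import Mathlib
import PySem

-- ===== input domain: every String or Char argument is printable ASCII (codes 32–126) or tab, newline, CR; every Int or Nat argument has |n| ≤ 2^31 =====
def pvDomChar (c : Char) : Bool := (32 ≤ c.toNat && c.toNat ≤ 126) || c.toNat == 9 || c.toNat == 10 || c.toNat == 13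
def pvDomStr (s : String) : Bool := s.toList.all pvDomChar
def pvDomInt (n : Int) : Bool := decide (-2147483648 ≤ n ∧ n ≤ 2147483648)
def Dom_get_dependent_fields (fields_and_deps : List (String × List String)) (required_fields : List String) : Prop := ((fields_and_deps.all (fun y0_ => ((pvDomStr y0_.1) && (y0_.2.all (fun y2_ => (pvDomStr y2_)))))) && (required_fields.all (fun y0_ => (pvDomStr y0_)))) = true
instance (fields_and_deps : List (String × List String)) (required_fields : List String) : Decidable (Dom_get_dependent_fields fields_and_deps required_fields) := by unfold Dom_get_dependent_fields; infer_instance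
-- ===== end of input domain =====

-- B replaces A's repeated rescans of every dependency list by a reverse-dependency index whose
-- edge lists are built once and fired at most once, with boolean frontier arrays marking the
-- entries to visit; the returned set is proved equal to A's on all inputs.


-- ===== PORT A =====
-- inner 'for deps in fd[1]: …' loop of A (state = (required, dependent, found_new))
def aInner (name : String) : List String → (PySem.Set String × PySem.Set String × Bool) → (PySem.Set String × PySem.Set String × Bool)
  | [], st => st
  | d :: ds, st =>
    if PySem.Set.contains st.1 d = true then
      aInner name ds (PySem.Set.add st.1 name, PySem.Set.add st.2.1 name, true)
    else
      aInner name ds st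

-- one 'for fd in fields_and_deps: …' pass of A
def aPass : List (String × List String) → (PySem.Set String × PySem.Set String × Bool) → (PySem.Set String × PySem.Set String × Bool)
  | [], st => st
  | fd :: fs, st =>
    if PySem.Set.contains st.1 fd.1 = true then aPass fs st
    else aPass fs (aInner fd.1 fd.2 st)

-- lemmas the port needs for termination of A's 'while True' loop
theorem aInner_fix (ds : List String) (name : String) (req dep : PySem.Set String)
    (h1 : name ∈ req) (h2 : name ∈ dep) :
    aInner name ds (req, dep, true) = (req, dep, true) := by
  induction ds with
  | nil => rfl
  | cons d ds ih =>
    simp only [aInner]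
    split
    · rw [show PySem.Set.add req name = req from by simp [PySem.Set.add, h1],
        show PySem.Set.add dep name = dep from by simp [PySem.Set.add, h2]]
      exact ih
    · exact ih

theorem aInner_eq (ds : List String) (name : String) (req dep : PySem.Set String) (f : Bool)
    (h : name ∉ req) :
    aInner name ds (req, dep, f) =
      if ds.any (fun d => PySem.Set.contains req d) = true then
        (req ++ [name], PySem.Set.add dep name, true)
      else (req, dep, f) := by
  induction ds with
  | nil => rfl
  | cons d ds ih =>
    by_cases hc : PySem.Set.contains req d = true
    · have hadd : PySem.Set.add req name = req ++ [name] := by simp [PySem.Set.add, h]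
      have hany : ((d :: ds).any fun x => PySem.Set.contains req x) = true := by
        simp only [List.any_cons, hc, Bool.true_or]
      rw [if_pos hany]
      show aInner name (d :: ds) (req, dep, f) = _
      simp only [aInner, hc, if_pos, hadd]
      exact aInner_fix ds name _ _ (by simp) (by by_cases hd : name ∈ dep <;> simp [PySem.Set.add, hd])
    · have hcf : PySem.Set.contains req d = false := by simpa using hc
      have hany : ((d :: ds).any fun x => PySem.Set.contains req x)
          = (ds.any fun x => PySem.Set.contains req x) := by
        simp only [List.any_cons, hcf, Bool.false_or]
      rw [hany, ← ih]
      show aInner name (d :: ds) (req, dep, f) = aInner name ds (req, dep, f)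
      simp only [aInner, hcf, Bool.false_eq_true, if_false]

theorem aPass_grow (fields : List (String × List String)) (req dep : PySem.Set String) (f : Bool) :
    ∃ l : List String, (aPass fields (req, dep, f)).1 = req ++ l
      ∧ (∀ k ∈ l, k ∈ fields.map Prod.fst ∧ k ∉ req)
      ∧ ((aPass fields (req, dep, f)).2.2 = true → f = true ∨ l ≠ []) := by
  induction fields generalizing req dep f with
  | nil => exact ⟨[], by simp [aPass], by simp, fun h => Or.inl h⟩
  | cons fd fs ih =>
    by_cases hk : fd.1 ∈ req
    · have hstep : aPass (fd :: fs) (req, dep, f) = aPass fs (req, dep, f) := by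
        simp only [aPass]
        rw [if_pos (by simpa [PySem.Set.contains] using hk)]
      obtain ⟨l, h1, h2, h3⟩ := ih req dep f
      exact ⟨l, by rw [hstep]; exact h1,
        fun k hkl => ⟨List.mem_cons_of_mem _ (h2 k hkl).1, (h2 k hkl).2⟩,
        by rw [hstep]; exact h3⟩
    · have hkc : PySem.Set.contains req fd.1 = false := by
        simpa [PySem.Set.contains] using hk
      by_cases hany : fd.2.any (fun d => PySem.Set.contains req d) = true
      · have hstep : aPass (fd :: fs) (req, dep, f)
            = aPass fs (req ++ [fd.1], PySem.Set.add dep fd.1, true) := by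
          simp only [aPass]
          rw [if_neg (by simpa [PySem.Set.contains] using hk), aInner_eq _ _ _ _ _ hk, if_pos hany]
        obtain ⟨l, h1, h2, h3⟩ := ih (req ++ [fd.1]) (PySem.Set.add dep fd.1) true
        refine ⟨fd.1 :: l, ?_, ?_, fun _ => Or.inr (by simp)⟩
        · rw [hstep, h1]; simp
        · intro k hkl
          rcases List.mem_cons.mp hkl with rfl | hkl
          · exact ⟨List.mem_cons_self .., hk⟩
          · refine ⟨List.mem_cons_of_mem _ (h2 k hkl).1, fun hmem => ?_⟩
            exact (h2 k hkl).2 (List.mem_append_left _ hmem)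
      · have hstep : aPass (fd :: fs) (req, dep, f) = aPass fs (req, dep, f) := by
          simp only [aPass]
          rw [if_neg (by simpa [PySem.Set.contains] using hk), aInner_eq _ _ _ _ _ hk, if_neg hany]
        obtain ⟨l, h1, h2, h3⟩ := ih req dep f
        exact ⟨l, by rw [hstep]; exact h1,
          fun k hkl => ⟨List.mem_cons_of_mem _ (h2 k hkl).1, (h2 k hkl).2⟩,
          by rw [hstep]; exact h3⟩

theorem countP_lt_of_witness {α : Type} (l : List α) (p q : α → Bool)
    (hmono : ∀ a, p a = true → q a = true) (a : α) (ha : a ∈ l) (hq : q a = true) (hp : p a = false) :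
    l.countP p < l.countP q := by
  induction l with
  | nil => cases ha
  | cons b bs ih =>
    simp only [List.countP_cons]
    rcases List.mem_cons.mp ha with rfl | hmem
    · have hle : bs.countP p ≤ bs.countP q := List.countP_mono_left (fun x _ hx => hmono x hx)
      simp [hp, hq]
      omega
    · have hlt := ih hmem
      by_cases hb : p b = true
      · simp [hb, hmono b hb]
        omega
      · have hb' : p b = false := by simpa using hb
        simp only [hb', Bool.false_eq_true, if_false]
        split <;> omega

theorem aPass_progress (fields : List (String × List String)) (req dep : PySem.Set String)
    (h : (aPass fields (req, dep, false)).2.2 = true) :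
    ((fields.map Prod.fst).countP fun k => !(PySem.Set.contains (aPass fields (req, dep, false)).1 k))
      < ((fields.map Prod.fst).countP fun k => !(PySem.Set.contains req k)) := by
  obtain ⟨l, h1, h2, h3⟩ := aPass_grow fields req dep false
  rcases h3 h with hf | hne
  · cases hf
  · obtain ⟨k0, l', rfl⟩ : ∃ k0 l', l = k0 :: l' := by
      cases l with
      | nil => exact absurd rfl hne
      | cons a b => exact ⟨a, b, rfl⟩
    refine countP_lt_of_witness _ _ _ ?_ k0 (h2 k0 (by simp)).1
      (by simp [PySem.Set.contains, (h2 k0 (by simp)).2]) ?_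
    · intro a hpa
      simp only [Bool.not_eq_true', PySem.Set.contains] at hpa ⊢
      simp only [List.contains_eq_mem, decide_eq_false_iff_not] at hpa ⊢
      intro hmem
      exact hpa (by rw [h1]; exact List.mem_append_left _ hmem)
    · rw [h1]
      simp [PySem.Set.contains]

-- A's 'while True: … if not found_new: break' loop
def aLoop (fields : List (String × List String)) (required dependent : PySem.Set String) : PySem.Set String :=
  if h : (aPass fields (required, dependent, false)).2.2 = true then
    aLoop fields (aPass fields (required, dependent, false)).1 (aPass fields (required, dependent, false)).2.1
  else
    (aPass fields (required, dependent, false)).2.1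
termination_by (fields.map Prod.fst).countP fun k => !(PySem.Set.contains required k)
decreasing_by exact aPass_progress fields required dependent h

def get_dependent_fields (fields_and_deps : List (String × List String)) (required_fields : List String) : List String :=
  aLoop fields_and_deps (PySem.Set.ofList required_fields) PySem.Set.empty

-- ===== PORT B =====
-- 'for d in fd[1]: rdeps.setdefault(d, []).append(i)'
def addDeps (i : Nat) : List String → PySem.Dict String (List Nat) → PySem.Dict String (List Nat)
  | [], r => r
  | d :: ds, r => addDeps i ds (r.insert d (r.getD d [] ++ [i]))

-- 'for i, fd in enumerate(fields_and_deps): …' building the reverse-dependency index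
def buildR : Nat → List (String × List String) → PySem.Dict String (List Nat) → PySem.Dict String (List Nat)
  | _, [], r => r
  | i, fd :: fs, r => buildR (i + 1) fs (addDeps i fd.2 r)

-- 'for k in rdeps.get(d, ()): cur[k] = True'
def markAll : List Nat → List Bool → List Bool
  | [], cur => cur
  | k :: ks, cur => markAll ks (cur.set k true)

-- 'for d in required: …' seeding the frontier
def markSeeds (rdeps : PySem.Dict String (List Nat)) : List String → List Bool → List Bool
  | [], cur => cur
  | d :: ds, cur => markSeeds rdeps ds (markAll (rdeps.getD d []) cur)

-- 'for k in rdeps.get(name, ()): if k > i: cur[k] = True else: nxt[k] = True'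
def fire (i : Nat) : List Nat → List Bool → List Bool → List Bool × List Bool
  | [], cur, nxt => (cur, nxt)
  | k :: ks, cur, nxt => if i < k then fire i ks (cur.set k true) nxt else fire i ks cur (nxt.set k true)

-- 'for i in range(n): …' body of one round (state = (cur, nxt, required, dependent))
def bScan (fields : List (String × List String)) (rdeps : PySem.Dict String (List Nat)) :
    List Nat → List Bool → List Bool → PySem.Set String → PySem.Set String →
    List Bool × List Bool × PySem.Set String × PySem.Set String
  | [], cur, nxt, req, dep => (cur, nxt, req, dep)
  | i :: idxs, cur, nxt, req, dep =>
    if cur.getD i false = true then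
      if PySem.Set.contains req (fields.getD i ("", [])).1 = true then
        bScan fields rdeps idxs cur nxt req dep
      else
        bScan fields rdeps idxs
          (fire i (rdeps.getD (fields.getD i ("", [])).1 []) cur nxt).1
          (fire i (rdeps.getD (fields.getD i ("", [])).1 []) cur nxt).2
          (PySem.Set.add req (fields.getD i ("", [])).1)
          (PySem.Set.add dep (fields.getD i ("", [])).1)
    else bScan fields rdeps idxs cur nxt req dep

-- lemma the port needs for termination of B's 'while any(cur)' loop
theorem bScan_prog (fields : List (String × List String)) (rdeps : PySem.Dict String (List Nat)) :
    ∀ (idxs : List Nat) (cur nxt : List Bool) (req dep : PySem.Set String),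
      (∀ i ∈ idxs, i < fields.length) → ∃ l : List String,
      (bScan fields rdeps idxs cur nxt req dep).2.2.1 = req ++ l
      ∧ (∀ x ∈ l, x ∈ fields.map Prod.fst ∧ x ∉ req)
      ∧ (l = [] → bScan fields rdeps idxs cur nxt req dep = (cur, nxt, req, dep)) := by
  intro idxs
  induction idxs with
  | nil =>
    intro cur nxt req dep _
    exact ⟨[], by simp [bScan], by simp, fun _ => rfl⟩
  | cons i idxs ih =>
    intro cur nxt req dep hb
    have h : i < fields.length := hb i (by simp)
    by_cases hc : cur.getD i false = true
    · by_cases hr : PySem.Set.contains req (fields.getD i ("", [])).1 = true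
      · have hstep : bScan fields rdeps (i :: idxs) cur nxt req dep
            = bScan fields rdeps idxs cur nxt req dep := by
          simp only [bScan]
          rw [if_pos hc, if_pos hr]
        rw [hstep]
        exact ih cur nxt req dep (fun j hj => hb j (List.mem_cons_of_mem _ hj))
      · have hstep : bScan fields rdeps (i :: idxs) cur nxt req dep
            = bScan fields rdeps idxs
                (fire i (rdeps.getD (fields.getD i ("", [])).1 []) cur nxt).1
                (fire i (rdeps.getD (fields.getD i ("", [])).1 []) cur nxt).2
                (PySem.Set.add req (fields.getD i ("", [])).1)
                (PySem.Set.add dep (fields.getD i ("", [])).1) := by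
          simp only [bScan]
          rw [if_pos hc, if_neg hr]
        rw [hstep]
        obtain ⟨l, h1, h2, h3⟩ := ih
          (fire i (rdeps.getD (fields.getD i ("", [])).1 []) cur nxt).1
          (fire i (rdeps.getD (fields.getD i ("", [])).1 []) cur nxt).2
          (PySem.Set.add req (fields.getD i ("", [])).1)
          (PySem.Set.add dep (fields.getD i ("", [])).1)
          (fun j hj => hb j (List.mem_cons_of_mem _ hj))
        refine ⟨(fields.getD i ("", [])).1 :: l, ?_, ?_, ?_⟩
        · have hnm : (fields.getD i ("", [])).1 ∉ req := by simpa [PySem.Set.contains] using hr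
          rw [h1, PySem.Set.add_of_not_mem hnm, List.append_assoc, List.singleton_append]
        · intro x hx
          rcases List.mem_cons.mp hx with rfl | hx
          · refine ⟨?_, by simpa [PySem.Set.contains] using hr⟩
            rw [List.getD_eq_getElem fields ("", []) h]
            exact List.mem_map_of_mem (List.getElem_mem h)
          · obtain ⟨ha, hb'⟩ := h2 x hx
            refine ⟨ha, fun hmem => hb' ?_⟩
            simp [PySem.Set.add_eq_ite]
            split <;> simp [hmem]
        · intro hl; cases hl
    · have hstep : bScan fields rdeps (i :: idxs) cur nxt req dep
          = bScan fields rdeps idxs cur nxt req dep := by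
        simp only [bScan]
        rw [if_neg hc]
      rw [hstep]
      exact ih cur nxt req dep (fun j hj => hb j (List.mem_cons_of_mem _ hj))

theorem bLoop_dec (fields : List (String × List String)) (rdeps : PySem.Dict String (List Nat))
    (cur : List Bool) (req dep : PySem.Set String) (hany : cur.any id = true) :
    2 * ((fields.map Prod.fst).countP fun k =>
        !(PySem.Set.contains (bScan fields rdeps (List.range fields.length) cur (List.replicate fields.length false) req dep).2.2.1 k))
      + (if (bScan fields rdeps (List.range fields.length) cur (List.replicate fields.length false) req dep).2.1.any id = true then 1 else 0)
    < 2 * ((fields.map Prod.fst).countP fun k => !(PySem.Set.contains req k))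
      + (if cur.any id = true then 1 else 0) := by
  obtain ⟨l, h1, h2, h3⟩ := bScan_prog fields rdeps (List.range fields.length) cur
    (List.replicate fields.length false) req dep (fun j hj => List.mem_range.mp hj)
  cases l with
  | nil =>
    rw [h3 rfl]
    simp only [List.append_nil] at h1
    simp [hany]
  | cons x l' =>
    have hlt : ((fields.map Prod.fst).countP fun k =>
          !(PySem.Set.contains (bScan fields rdeps (List.range fields.length) cur (List.replicate fields.length false) req dep).2.2.1 k))
        < ((fields.map Prod.fst).countP fun k => !(PySem.Set.contains req k)) := by
      refine countP_lt_of_witness _ _ _ ?_ x (h2 x (by simp)).1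
        (by simp [PySem.Set.contains, (h2 x (by simp)).2]) ?_
      · intro a hpa
        simp only [Bool.not_eq_true', PySem.Set.contains, List.contains_eq_mem,
          decide_eq_false_iff_not] at hpa ⊢
        intro hmem
        exact hpa (by rw [h1]; exact List.mem_append_left _ hmem)
      · rw [h1]
        simp [PySem.Set.contains]
    rw [if_pos hany]
    split <;> omega

-- B's 'while any(cur): …' loop
def bLoop (fields : List (String × List String)) (rdeps : PySem.Dict String (List Nat))
    (cur : List Bool) (req dep : PySem.Set String) : PySem.Set String :=
  if cur.any id = true then
    bLoop fields rdeps
      (bScan fields rdeps (List.range fields.length) cur (List.replicate fields.length false) req dep).2.1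
      (bScan fields rdeps (List.range fields.length) cur (List.replicate fields.length false) req dep).2.2.1
      (bScan fields rdeps (List.range fields.length) cur (List.replicate fields.length false) req dep).2.2.2
  else dep
termination_by 2 * ((fields.map Prod.fst).countP fun k => !(PySem.Set.contains req k))
  + (if cur.any id = true then 1 else 0)
decreasing_by exact bLoop_dec fields rdeps cur req dep (by assumption)

def get_dependent_fields_alt (fields_and_deps : List (String × List String)) (required_fields : List String) : List String :=
  let required := PySem.Set.ofList required_fields
  let rdeps := buildR 0 fields_and_deps PySem.Dict.empty
  let cur := markSeeds rdeps required (List.replicate fields_and_deps.length false)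
  bLoop fields_and_deps rdeps cur required PySem.Set.empty

-- ===== PRECONDITION & SPEC =====
def Spec_get_dependent_fields (fields_and_deps : List (String × List String)) (required_fields : List String) (out : List String) : Prop := out = get_dependent_fields_alt fields_and_deps required_fields
instance (fields_and_deps : List (String × List String)) (required_fields : List String) (out : List String) : Decidable (Spec_get_dependent_fields fields_and_deps required_fields out) := by unfold Spec_get_dependent_fields; infer_instance

-- ===== CLAIM (what is proved, stated in full; the proofs are below) =====
def Claim_equal_get_dependent_fields : Prop := ∀ (fields_and_deps : List (String × List String)) (required_fields : List String), Dom_get_dependent_fields fields_and_deps required_fields → Spec_get_dependent_fields fields_and_deps required_fields (get_dependent_fields fields_and_deps required_fields)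

-- ===== LEMMAS AND PROOFS =====

-- getD after set, within bounds
theorem pvGetDSet (l : List Bool) (k j : Nat) (hk : k < l.length) :
    (l.set k true).getD j false = if j = k then true else l.getD j false := by
  rw [List.getD, List.getD, List.getElem?_set]
  split
  · next h => subst h; simp
  · next h => rw [if_neg (fun hh => h hh.symm)]

theorem pvGetDReplicate (n j : Nat) : (List.replicate n false).getD j false = false := by
  by_cases h : j < n
  · rw [List.getD_eq_getElem _ _ (by simpa using h)]; simp
  · exact List.getD_eq_default _ _ (by simpa using Nat.le_of_not_lt h)

theorem pvAnyFalse_getD (l : List Bool) (h : l.any id = false) (k : Nat) :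
    l.getD k false = false := by
  by_cases hk : k < l.length
  · rw [List.getD_eq_getElem _ _ hk]
    have := List.any_eq_false.mp h l[k] (List.getElem_mem hk)
    simpa using this
  · exact List.getD_eq_default _ _ (Nat.le_of_not_lt hk)

-- effect of 'fire': marks listed indices > i in cur, the rest in nxt
theorem fire_spec (i : Nat) :
    ∀ (ks : List Nat) (cur nxt : List Bool),
      (∀ k ∈ ks, k < cur.length) → (∀ k ∈ ks, k < nxt.length) →
      (fire i ks cur nxt).1.length = cur.length ∧ (fire i ks cur nxt).2.length = nxt.length ∧
      (∀ j, (fire i ks cur nxt).1.getD j false = true ↔ cur.getD j false = true ∨ (j ∈ ks ∧ i < j)) ∧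
      (∀ j, (fire i ks cur nxt).2.getD j false = true ↔ nxt.getD j false = true ∨ (j ∈ ks ∧ ¬ i < j)) := by
  intro ks
  induction ks with
  | nil => exact fun cur nxt _ _ => ⟨rfl, rfl, fun j => by simp [fire], fun j => by simp [fire]⟩
  | cons k ks ih =>
    intro cur nxt hbc hbn
    by_cases hik : i < k
    · have hstep : fire i (k :: ks) cur nxt = fire i ks (cur.set k true) nxt := by
        simp [fire, hik]
      obtain ⟨l1, l2, c1, c2⟩ := ih (cur.set k true) nxt
        (fun x hx => by rw [List.length_set]; exact hbc x (List.mem_cons_of_mem _ hx))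
        (fun x hx => hbn x (List.mem_cons_of_mem _ hx))
      rw [hstep]
      refine ⟨by rw [l1, List.length_set], l2, fun j => ?_, fun j => ?_⟩
      · rw [c1 j, pvGetDSet cur k j (hbc k (by simp))]
        by_cases hjk : j = k
        · subst hjk; simp [hik]
        · simp only [hjk, if_false, List.mem_cons]
          constructor
          · rintro (h | ⟨h1, h2⟩)
            · exact Or.inl h
            · exact Or.inr ⟨Or.inr h1, h2⟩
          · rintro (h | ⟨h1 | h1, h2⟩)
            · exact Or.inl h
            · exact h1.elim
            · exact Or.inr ⟨h1, h2⟩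
      · rw [c2 j]
        constructor
        · rintro (h | ⟨h1, h2⟩)
          · exact Or.inl h
          · exact Or.inr ⟨List.mem_cons_of_mem _ h1, h2⟩
        · rintro (h | ⟨h1, h2⟩)
          · exact Or.inl h
          · rcases List.mem_cons.mp h1 with rfl | h1
            · exact absurd hik h2
            · exact Or.inr ⟨h1, h2⟩
    · have hstep : fire i (k :: ks) cur nxt = fire i ks cur (nxt.set k true) := by
        simp [fire, hik]
      obtain ⟨l1, l2, c1, c2⟩ := ih cur (nxt.set k true)
        (fun x hx => hbc x (List.mem_cons_of_mem _ hx))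
        (fun x hx => by rw [List.length_set]; exact hbn x (List.mem_cons_of_mem _ hx))
      rw [hstep]
      refine ⟨l1, by rw [l2, List.length_set], fun j => ?_, fun j => ?_⟩
      · rw [c1 j]
        constructor
        · rintro (h | ⟨h1, h2⟩)
          · exact Or.inl h
          · exact Or.inr ⟨List.mem_cons_of_mem _ h1, h2⟩
        · rintro (h | ⟨h1, h2⟩)
          · exact Or.inl h
          · rcases List.mem_cons.mp h1 with rfl | h1
            · exact absurd h2 hik
            · exact Or.inr ⟨h1, h2⟩
      · rw [c2 j, pvGetDSet nxt k j (hbn k (by simp))]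
        by_cases hjk : j = k
        · subst hjk; simp [hik]
        · simp only [hjk, if_false, List.mem_cons]
          constructor
          · rintro (h | ⟨h1, h2⟩)
            · exact Or.inl h
            · exact Or.inr ⟨Or.inr h1, h2⟩
          · rintro (h | ⟨h1 | h1, h2⟩)
            · exact Or.inl h
            · exact h1.elim
            · exact Or.inr ⟨h1, h2⟩

-- membership in the reverse index
theorem mem_addDeps (i : Nat) :
    ∀ (ds : List String) (r : PySem.Dict String (List Nat)) (k : Nat) (m : String),
      k ∈ (addDeps i ds r).getD m [] ↔ k ∈ r.getD m [] ∨ (m ∈ ds ∧ k = i) := by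
  intro ds
  induction ds with
  | nil => simp [addDeps]
  | cons d ds ih =>
    intro r k m
    rw [addDeps, ih]
    by_cases hmd : m = d
    · subst hmd
      rw [PySem.Dict.getD_insert, if_pos rfl]
      simp only [List.mem_append, List.mem_cons]
      tauto
    · rw [PySem.Dict.getD_insert, if_neg hmd]
      simp only [List.mem_cons]
      tauto

theorem mem_buildR :
    ∀ (fs : List (String × List String)) (i : Nat) (r : PySem.Dict String (List Nat)) (k : Nat) (m : String),
      k ∈ (buildR i fs r).getD m [] ↔ k ∈ r.getD m []
        ∨ ∃ j, j < fs.length ∧ k = i + j ∧ m ∈ (fs.getD j ("", [])).2 := by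
  intro fs
  induction fs with
  | nil => simp [buildR]
  | cons fd fs ih =>
    intro i r k m
    rw [buildR, ih, mem_addDeps]
    constructor
    · rintro ((h | ⟨h1, h2⟩) | ⟨j, hj, hk, hm⟩)
      · exact Or.inl h
      · exact Or.inr ⟨0, by simp, by omega, by simpa using h1⟩
      · exact Or.inr ⟨j + 1, by simpa using hj, by omega, by simpa using hm⟩
    · rintro (h | ⟨j, hj, hk, hm⟩)
      · exact Or.inl (Or.inl h)
      · cases j with
        | zero => exact Or.inl (Or.inr ⟨by simpa using hm, by omega⟩)
        | succ j => exact Or.inr ⟨j, by simpa using hj, by omega, by simpa using hm⟩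

theorem rdeps_char (fields : List (String × List String)) (k : Nat) (m : String) :
    k ∈ (buildR 0 fields PySem.Dict.empty).getD m [] ↔
      k < fields.length ∧ m ∈ (fields.getD k ("", [])).2 := by
  rw [mem_buildR]
  simp only [PySem.Dict.getD_empty, List.not_mem_nil, false_or]
  constructor
  · rintro ⟨j, hj, hk, hm⟩
    exact ⟨by omega, by rwa [show k = j by omega]⟩
  · rintro ⟨hk, hm⟩
    exact ⟨k, hk, by omega, hm⟩

-- seeding the frontier
theorem markAll_spec :
    ∀ (ks : List Nat) (cur : List Bool), (∀ k ∈ ks, k < cur.length) →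
      (markAll ks cur).length = cur.length ∧
      ∀ j, (markAll ks cur).getD j false = true ↔ cur.getD j false = true ∨ j ∈ ks := by
  intro ks
  induction ks with
  | nil => exact fun cur _ => ⟨rfl, fun j => by simp [markAll]⟩
  | cons k ks ih =>
    intro cur hb
    obtain ⟨l1, c1⟩ := ih (cur.set k true)
      (fun x hx => by rw [List.length_set]; exact hb x (List.mem_cons_of_mem _ hx))
    rw [markAll]
    refine ⟨by rw [l1, List.length_set], fun j => ?_⟩
    rw [c1 j, pvGetDSet cur k j (hb k (by simp))]
    by_cases hjk : j = k
    · subst hjk; simp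
    · simp only [hjk, if_false, List.mem_cons, false_or]

theorem markSeeds_spec (rdeps : PySem.Dict String (List Nat)) :
    ∀ (ds : List String) (cur : List Bool),
      (∀ d k, k ∈ rdeps.getD d [] → k < cur.length) →
      (markSeeds rdeps ds cur).length = cur.length ∧
      ∀ j, (markSeeds rdeps ds cur).getD j false = true ↔
        cur.getD j false = true ∨ ∃ d ∈ ds, j ∈ rdeps.getD d [] := by
  intro ds
  induction ds with
  | nil => exact fun cur _ => ⟨rfl, fun j => by simp [markSeeds]⟩
  | cons d ds ih =>
    intro cur hb
    obtain ⟨la, ca⟩ := markAll_spec (rdeps.getD d []) cur (fun k hk => hb d k hk)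
    obtain ⟨l1, c1⟩ := ih (markAll (rdeps.getD d []) cur) (fun d' k hk => by rw [la]; exact hb d' k hk)
    rw [markSeeds]
    refine ⟨by rw [l1, la], fun j => ?_⟩
    rw [c1 j, ca j]
    constructor
    · rintro ((h | h) | ⟨d', hd', hj⟩)
      · exact Or.inl h
      · exact Or.inr ⟨d, by simp, h⟩
      · exact Or.inr ⟨d', List.mem_cons_of_mem _ hd', hj⟩
    · rintro (h | ⟨d', hd', hj⟩)
      · exact Or.inl (Or.inl h)
      · rcases List.mem_cons.mp hd' with rfl | hd'
        · exact Or.inl (Or.inr hj)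
        · exact Or.inr ⟨d', hd', hj⟩

-- A's pass is the identity when nothing can trigger
theorem aPass_id :
    ∀ (fs : List (String × List String)) (req dep : PySem.Set String) (f : Bool),
      (∀ fd ∈ fs, fd.1 ∈ req ∨ ∀ d ∈ fd.2, d ∉ req) →
      aPass fs (req, dep, f) = (req, dep, f) := by
  intro fs
  induction fs with
  | nil => intro req dep f _; rfl
  | cons fd fs ih =>
    intro req dep f h
    by_cases hk : fd.1 ∈ req
    · rw [aPass, if_pos (by simpa [PySem.Set.contains] using hk)]
      exact ih req dep f (fun x hx => h x (List.mem_cons_of_mem _ hx))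
    · have hnd : ∀ d ∈ fd.2, d ∉ req := (h fd (by simp)).resolve_left hk
      have hany : ¬ fd.2.any (fun d => PySem.Set.contains req d) = true := by
        intro hc
        obtain ⟨d, hd, hdc⟩ := List.any_eq_true.mp hc
        exact hnd d hd (by simpa [PySem.Set.contains] using hdc)
      rw [aPass, if_neg (by simpa [PySem.Set.contains] using hk),
        aInner_eq _ _ _ _ _ hk, if_neg hany]
      exact ih req dep f (fun x hx => h x (List.mem_cons_of_mem _ hx))

-- flag monotone / flag false means no additions
theorem aInner_flagT (name : String) :
    ∀ (ds : List String) (st : PySem.Set String × PySem.Set String × Bool),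
      st.2.2 = true → (aInner name ds st).2.2 = true := by
  intro ds
  induction ds with
  | nil => exact fun st h => h
  | cons d ds ih =>
    intro st h
    simp only [aInner]
    split
    · exact ih _ rfl
    · exact ih _ h

theorem aPass_flagT :
    ∀ (fs : List (String × List String)) (st : PySem.Set String × PySem.Set String × Bool),
      st.2.2 = true → (aPass fs st).2.2 = true := by
  intro fs
  induction fs with
  | nil => exact fun st h => h
  | cons fd fs ih =>
    intro st h
    simp only [aPass]
    split
    · exact ih _ h
    · exact ih _ (aInner_flagT fd.1 fd.2 st h)

theorem aPass_flag_false :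
    ∀ (fs : List (String × List String)) (req dep : PySem.Set String),
      (aPass fs (req, dep, false)).2.2 = false →
      (aPass fs (req, dep, false)).1 = req ∧ (aPass fs (req, dep, false)).2.1 = dep := by
  intro fs
  induction fs with
  | nil => exact fun req dep _ => ⟨rfl, rfl⟩
  | cons fd fs ih =>
    intro req dep h
    by_cases hk : fd.1 ∈ req
    · rw [aPass, if_pos (by simpa [PySem.Set.contains] using hk)] at h ⊢
      exact ih req dep h
    · by_cases hany : fd.2.any (fun d => PySem.Set.contains req d) = true
      · exfalso
        rw [aPass, if_neg (by simpa [PySem.Set.contains] using hk),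
          aInner_eq _ _ _ _ _ hk, if_pos hany] at h
        rw [aPass_flagT fs _ rfl] at h
        cases h
      · rw [aPass, if_neg (by simpa [PySem.Set.contains] using hk),
          aInner_eq _ _ _ _ _ hk, if_neg hany] at h ⊢
        exact ih req dep h

-- one B round (from index i) computes exactly one A pass over the remaining entries,
-- and leaves 'nxt' characterising the entries with a newly required dependency
theorem scan_eq (fields : List (String × List String)) (rdeps : PySem.Dict String (List Nat))
    (hR : ∀ m k, k ∈ rdeps.getD m [] ↔ k < fields.length ∧ m ∈ (fields.getD k ("", [])).2) :
    ∀ (m i : Nat), i + m = fields.length →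
      ∀ (cur nxt : List Bool) (req dep : PySem.Set String) (f : Bool),
      cur.length = fields.length → nxt.length = fields.length →
      (∀ k, i ≤ k → k < fields.length → (fields.getD k ("", [])).1 ∉ req →
          (cur.getD k false = true ↔ ∃ d ∈ (fields.getD k ("", [])).2, d ∈ req)) →
      (∀ k, k < fields.length → (fields.getD k ("", [])).1 ∉ req → nxt.getD k false = true →
          ∃ d ∈ (fields.getD k ("", [])).2, d ∈ req) →
      (∀ k, k < i → k < fields.length → (fields.getD k ("", [])).1 ∉ req →
          (∃ d ∈ (fields.getD k ("", [])).2, d ∈ req) → nxt.getD k false = true) →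
      (bScan fields rdeps (List.range' i m) cur nxt req dep).2.2.1 = (aPass (fields.drop i) (req, dep, f)).1 ∧
      (bScan fields rdeps (List.range' i m) cur nxt req dep).2.2.2 = (aPass (fields.drop i) (req, dep, f)).2.1 ∧
      (bScan fields rdeps (List.range' i m) cur nxt req dep).2.1.length = fields.length ∧
      (∀ k, k < fields.length → (fields.getD k ("", [])).1 ∉ (aPass (fields.drop i) (req, dep, f)).1 →
          ((bScan fields rdeps (List.range' i m) cur nxt req dep).2.1.getD k false = true ↔
           ∃ d ∈ (fields.getD k ("", [])).2, d ∈ (aPass (fields.drop i) (req, dep, f)).1)) := by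
  intro m
  induction m with
  | zero =>
    intro i him cur nxt req dep f hlc hln hA hB1 hB2
    have hdrop : fields.drop i = [] := List.drop_eq_nil_of_le (by omega)
    rw [hdrop, List.range'_zero]
    refine ⟨rfl, rfl, hln, fun k hk hnr => ?_⟩
    exact ⟨fun hnx => hB1 k hk hnr hnx, fun hex => hB2 k (by omega) hk hnr hex⟩
  | succ m ihm =>
    intro i him cur nxt req dep f hlc hln hA hB1 hB2
    have h : i < fields.length := by omega
    have hdrop : fields.drop i = fields.getD i ("", []) :: fields.drop (i + 1) := by
      rw [List.getD_eq_getElem fields _ h]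
      exact (List.getElem_cons_drop h).symm
    rw [List.range'_succ]
    by_cases hc : cur.getD i false = true
    · by_cases hr : PySem.Set.contains req (fields.getD i ("", [])).1 = true
      · -- entry already required: both sides skip it
        have hstepB : bScan fields rdeps (i :: List.range' (i + 1) m) cur nxt req dep
            = bScan fields rdeps (List.range' (i + 1) m) cur nxt req dep := by
          simp only [bScan]
          rw [if_pos hc, if_pos hr]
        have hstepA : aPass (fields.drop i) (req, dep, f) = aPass (fields.drop (i + 1)) (req, dep, f) := by
          rw [hdrop]
          simp only [aPass]
          rw [if_pos hr]
        have hki : (fields.getD i ("", [])).1 ∈ req := by simpa [PySem.Set.contains] using hr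
        obtain ⟨e1, e2, e3, e4⟩ := ihm (i + 1) (by omega) cur nxt req dep f hlc hln
          (fun k hik hk hnr => hA k (by omega) hk hnr) hB1
          (fun k hki' hk hnr hex => by
            rcases Nat.lt_or_ge k i with hlt | hge
            · exact hB2 k hlt hk hnr hex
            · exact absurd (by rwa [show k = i by omega]) hnr)
        rw [hstepB, hstepA]
        exact ⟨e1, e2, e3, e4⟩
      · -- newly triggered entry: A adds it, B adds it and fires its reverse edges
        have hnm : (fields.getD i ("", [])).1 ∉ req := by simpa [PySem.Set.contains] using hr
        have hex : ∃ d ∈ (fields.getD i ("", [])).2, d ∈ req := (hA i le_rfl h hnm).mp hc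
        have hany : (fields.getD i ("", [])).2.any (fun d => PySem.Set.contains req d) = true := by
          obtain ⟨d, hd, hdr⟩ := hex
          exact List.any_eq_true.mpr ⟨d, hd, by simpa [PySem.Set.contains] using hdr⟩
        have hadd : PySem.Set.add req (fields.getD i ("", [])).1 = req ++ [(fields.getD i ("", [])).1] :=
          PySem.Set.add_of_not_mem hnm
        have hstepB : bScan fields rdeps (i :: List.range' (i + 1) m) cur nxt req dep
            = bScan fields rdeps (List.range' (i + 1) m)
                (fire i (rdeps.getD (fields.getD i ("", [])).1 []) cur nxt).1
                (fire i (rdeps.getD (fields.getD i ("", [])).1 []) cur nxt).2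
                (req ++ [(fields.getD i ("", [])).1])
                (PySem.Set.add dep (fields.getD i ("", [])).1) := by
          simp only [bScan]
          rw [if_pos hc, if_neg hr, hadd]
        have hstepA : aPass (fields.drop i) (req, dep, f)
            = aPass (fields.drop (i + 1))
                (req ++ [(fields.getD i ("", [])).1], PySem.Set.add dep (fields.getD i ("", [])).1, true) := by
          rw [hdrop]
          simp only [aPass]
          rw [if_neg (by simpa [PySem.Set.contains] using hnm), aInner_eq _ _ _ _ _ hnm, if_pos hany]
        have hksb : ∀ k ∈ rdeps.getD (fields.getD i ("", [])).1 [], k < fields.length :=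
          fun k hk => ((hR _ k).mp hk).1
        obtain ⟨fl1, fl2, fc1, fc2⟩ := fire_spec i (rdeps.getD (fields.getD i ("", [])).1 []) cur nxt
          (fun k hk => by rw [hlc]; exact hksb k hk) (fun k hk => by rw [hln]; exact hksb k hk)
        have hmemreq : ∀ (x : String), x ∈ req ++ [(fields.getD i ("", [])).1] ↔
            x ∈ req ∨ x = (fields.getD i ("", [])).1 := by
          intro x; simp
        obtain ⟨e1, e2, e3, e4⟩ := ihm (i + 1) (by omega)
          (fire i (rdeps.getD (fields.getD i ("", [])).1 []) cur nxt).1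
          (fire i (rdeps.getD (fields.getD i ("", [])).1 []) cur nxt).2
          (req ++ [(fields.getD i ("", [])).1])
          (PySem.Set.add dep (fields.getD i ("", [])).1) true
          (by rw [fl1, hlc]) (by rw [fl2, hln])
          (fun k hik hk hnr => by
            have hnr1 : (fields.getD k ("", [])).1 ∉ req := fun hm => hnr ((hmemreq _).mpr (Or.inl hm))
            rw [fc1 k]
            constructor
            · rintro (hcur | ⟨hks, _⟩)
              · obtain ⟨d, hd, hdr⟩ := (hA k (by omega) hk hnr1).mp hcur
                exact ⟨d, hd, (hmemreq d).mpr (Or.inl hdr)⟩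
              · exact ⟨(fields.getD i ("", [])).1, ((hR _ k).mp hks).2, (hmemreq _).mpr (Or.inr rfl)⟩
            · rintro ⟨d, hd, hdr⟩
              rcases (hmemreq d).mp hdr with hdr | rfl
              · exact Or.inl ((hA k (by omega) hk hnr1).mpr ⟨d, hd, hdr⟩)
              · exact Or.inr ⟨(hR _ k).mpr ⟨hk, hd⟩, by omega⟩)
          (fun k hk hnr hnx => by
            have hnr1 : (fields.getD k ("", [])).1 ∉ req := fun hm => hnr ((hmemreq _).mpr (Or.inl hm))
            rcases (fc2 k).mp hnx with hnxt | ⟨hks, _⟩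
            · obtain ⟨d, hd, hdr⟩ := hB1 k hk hnr1 hnxt
              exact ⟨d, hd, (hmemreq d).mpr (Or.inl hdr)⟩
            · exact ⟨(fields.getD i ("", [])).1, ((hR _ k).mp hks).2, (hmemreq _).mpr (Or.inr rfl)⟩)
          (fun k hki' hk hnr hex' => by
            have hnr1 : (fields.getD k ("", [])).1 ∉ req := fun hm => hnr ((hmemreq _).mpr (Or.inl hm))
            obtain ⟨d, hd, hdr⟩ := hex'
            rcases (hmemreq d).mp hdr with hdr | rfl
            · rcases Nat.lt_or_ge k i with hlt | hge
              · exact (fc2 k).mpr (Or.inl (hB2 k hlt hk hnr1 ⟨d, hd, hdr⟩))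
              · exact absurd ((hmemreq _).mpr (Or.inr (by rw [show k = i by omega]))) hnr
            · exact (fc2 k).mpr (Or.inr ⟨(hR _ k).mpr ⟨hk, hd⟩, by omega⟩))
        rw [hstepB, hstepA]
        exact ⟨e1, e2, e3, e4⟩
    · -- unmarked entry: nothing of it is in 'required', A's inner scan finds nothing
      have hstepB : bScan fields rdeps (i :: List.range' (i + 1) m) cur nxt req dep
          = bScan fields rdeps (List.range' (i + 1) m) cur nxt req dep := by
        simp only [bScan]
        rw [if_neg hc]
      by_cases hki : (fields.getD i ("", [])).1 ∈ req
      · have hstepA : aPass (fields.drop i) (req, dep, f) = aPass (fields.drop (i + 1)) (req, dep, f) := by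
          rw [hdrop]
          simp only [aPass]
          rw [if_pos (by simpa [PySem.Set.contains] using hki)]
        obtain ⟨e1, e2, e3, e4⟩ := ihm (i + 1) (by omega) cur nxt req dep f hlc hln
          (fun k hik hk hnr => hA k (by omega) hk hnr) hB1
          (fun k hki' hk hnr hex => by
            rcases Nat.lt_or_ge k i with hlt | hge
            · exact hB2 k hlt hk hnr hex
            · exact absurd (by rwa [show k = i by omega]) hnr)
        rw [hstepB, hstepA]
        exact ⟨e1, e2, e3, e4⟩
      · have hno : ¬ ∃ d ∈ (fields.getD i ("", [])).2, d ∈ req := by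
          intro hex
          exact hc ((hA i le_rfl h hki).mpr hex)
        have hany : ¬ (fields.getD i ("", [])).2.any (fun d => PySem.Set.contains req d) = true := by
          intro ha
          obtain ⟨d, hd, hdc⟩ := List.any_eq_true.mp ha
          exact hno ⟨d, hd, by simpa [PySem.Set.contains] using hdc⟩
        have hstepA : aPass (fields.drop i) (req, dep, f) = aPass (fields.drop (i + 1)) (req, dep, f) := by
          rw [hdrop]
          simp only [aPass]
          rw [if_neg (by simpa [PySem.Set.contains] using hki), aInner_eq _ _ _ _ _ hki, if_neg hany]
        obtain ⟨e1, e2, e3, e4⟩ := ihm (i + 1) (by omega) cur nxt req dep f hlc hln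
          (fun k hik hk hnr => hA k (by omega) hk hnr) hB1
          (fun k hki' hk hnr hex => by
            rcases Nat.lt_or_ge k i with hlt | hge
            · exact hB2 k hlt hk hnr hex
            · exact absurd (by rwa [show k = i by omega] at hex) hno)
        rw [hstepB, hstepA]
        exact ⟨e1, e2, e3, e4⟩

-- an empty frontier means A's next pass finds nothing new
theorem loop_base (fields : List (String × List String)) (rdeps : PySem.Dict String (List Nat))
    (cur : List Bool) (req dep : PySem.Set String)
    (hany : cur.any id = false)
    (hA : ∀ k, k < fields.length → (fields.getD k ("", [])).1 ∉ req →
        (cur.getD k false = true ↔ ∃ d ∈ (fields.getD k ("", [])).2, d ∈ req)) :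
    bLoop fields rdeps cur req dep = aLoop fields req dep := by
  have hfd : ∀ fd ∈ fields, fd.1 ∈ req ∨ ∀ d ∈ fd.2, d ∉ req := by
    intro fd hfd
    obtain ⟨k, hk, rfl⟩ := List.mem_iff_getElem.mp hfd
    by_cases hki : (fields[k]).1 ∈ req
    · exact Or.inl hki
    · refine Or.inr fun d hd hdr => ?_
      have hgd : fields.getD k ("", []) = fields[k] := List.getD_eq_getElem fields _ hk
      have := (hA k hk (by rwa [hgd])).mpr ⟨d, by rwa [hgd], hdr⟩
      rw [pvAnyFalse_getD cur hany k] at this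
      cases this
  have hid := aPass_id fields req dep false hfd
  rw [bLoop, if_neg (by rw [hany]; simp), aLoop, dif_neg (by rw [hid]; simp), hid]

theorem loop_eq (fields : List (String × List String)) (rdeps : PySem.Dict String (List Nat))
    (hR : ∀ m k, k ∈ rdeps.getD m [] ↔ k < fields.length ∧ m ∈ (fields.getD k ("", [])).2) :
    ∀ (fuel : Nat) (cur : List Bool) (req dep : PySem.Set String),
      cur.length = fields.length →
      (∀ k, k < fields.length → (fields.getD k ("", [])).1 ∉ req →
          (cur.getD k false = true ↔ ∃ d ∈ (fields.getD k ("", [])).2, d ∈ req)) →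
      2 * ((fields.map Prod.fst).countP fun x => !(PySem.Set.contains req x))
        + (if cur.any id = true then 1 else 0) ≤ fuel →
      bLoop fields rdeps cur req dep = aLoop fields req dep := by
  intro fuel
  induction fuel with
  | zero =>
    intro cur req dep hlc hA hm
    by_cases hany : cur.any id = true
    · rw [hany] at hm; simp at hm
    · exact loop_base fields rdeps cur req dep (by simpa using hany) hA
  | succ fuel ih =>
    intro cur req dep hlc hA hm
    by_cases hany : cur.any id = true
    · obtain ⟨e1, e2, e3, e4⟩ := scan_eq fields rdeps hR fields.length 0 (by omega) cur
        (List.replicate fields.length false) req dep false hlc (by simp)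
        (fun k _ hk hnr => hA k hk hnr)
        (fun k hk hnr hnx => absurd hnx (by rw [pvGetDReplicate]; simp))
        (fun k hk _ _ _ => by omega)
      rw [List.drop_zero] at e1 e2 e4
      rw [← List.range_eq_range'] at e1 e2 e3 e4
      obtain ⟨l, p1, p2, p3⟩ := bScan_prog fields rdeps (List.range fields.length) cur
        (List.replicate fields.length false) req dep (fun j hj => List.mem_range.mp hj)
      cases l with
      | nil =>
        have hst := p3 rfl
        simp only [List.append_nil] at p1
        have hreq : (aPass fields (req, dep, false)).1 = req := by rw [← e1, p1]
        have hflag : ¬ (aPass fields (req, dep, false)).2.2 = true := by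
          intro hf
          obtain ⟨l', g1, _, g3⟩ := aPass_grow fields req dep false
          rcases g3 hf with hf' | hne
          · cases hf'
          · rw [hreq] at g1
            exact hne (List.append_right_eq_self.mp g1.symm)
        rw [bLoop, if_pos hany, hst, aLoop, dif_neg hflag]
        have hdep : (aPass fields (req, dep, false)).2.1 = dep := by
          rw [← e2, hst]
        rw [bLoop, if_neg (by simp), hdep]
      | cons x l' =>
        have hgrow : (aPass fields (req, dep, false)).1 = req ++ x :: l' := by rw [← e1, p1]
        have hflag : (aPass fields (req, dep, false)).2.2 = true := by
          by_contra hf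
          have hf' : (aPass fields (req, dep, false)).2.2 = false := by simpa using hf
          have := (aPass_flag_false fields req dep hf').1
          rw [hgrow] at this
          simpa using congrArg List.length this
        rw [bLoop, if_pos hany, aLoop, dif_pos hflag, ← e1, ← e2]
        rw [← e1] at e4
        have hlt : ((fields.map Prod.fst).countP fun k =>
              !(PySem.Set.contains (bScan fields rdeps (List.range fields.length) cur (List.replicate fields.length false) req dep).2.2.1 k))
            < ((fields.map Prod.fst).countP fun k => !(PySem.Set.contains req k)) := by
          refine countP_lt_of_witness _ _ _ ?_ x (p2 x (by simp)).1
            (by simp [PySem.Set.contains, (p2 x (by simp)).2]) ?_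
          · intro a hpa
            simp only [Bool.not_eq_true', PySem.Set.contains, List.contains_eq_mem,
              decide_eq_false_iff_not] at hpa ⊢
            intro hmem
            exact hpa (by rw [p1]; exact List.mem_append_left _ hmem)
          · rw [p1]
            simp [PySem.Set.contains]
        refine ih _ _ _ e3 e4 ?_
        rw [if_pos hany] at hm
        have hble : (if (bScan fields rdeps (List.range fields.length) cur (List.replicate fields.length false) req dep).2.1.any id = true then 1 else 0) ≤ 1 := by
          split <;> omega
        omega
    · exact loop_base fields rdeps cur req dep (by simpa using hany) hA

theorem main_eq (fields_and_deps : List (String × List String)) (required_fields : List String) :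
    get_dependent_fields fields_and_deps required_fields
      = get_dependent_fields_alt fields_and_deps required_fields := by
  unfold get_dependent_fields get_dependent_fields_alt
  have hR := fun m k => rdeps_char fields_and_deps k m
  obtain ⟨lm, cm⟩ := markSeeds_spec (buildR 0 fields_and_deps PySem.Dict.empty)
    (PySem.Set.ofList required_fields) (List.replicate fields_and_deps.length false)
    (fun d k hk => by
      rw [List.length_replicate]
      exact ((rdeps_char fields_and_deps k d).mp hk).1)
  have hA : ∀ k, k < fields_and_deps.length →
      (fields_and_deps.getD k ("", [])).1 ∉ PySem.Set.ofList required_fields →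
      ((markSeeds (buildR 0 fields_and_deps PySem.Dict.empty) (PySem.Set.ofList required_fields)
          (List.replicate fields_and_deps.length false)).getD k false = true ↔
        ∃ d ∈ (fields_and_deps.getD k ("", [])).2, d ∈ PySem.Set.ofList required_fields) := by
    intro k hk _
    rw [cm k, pvGetDReplicate]
    constructor
    · rintro (hf | ⟨d, hd, hkd⟩)
      · cases hf
      · exact ⟨d, ((rdeps_char fields_and_deps k d).mp hkd).2, hd⟩
    · rintro ⟨d, hd, hdr⟩
      exact Or.inr ⟨d, hdr, (rdeps_char fields_and_deps k d).mpr ⟨hk, hd⟩⟩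
  exact (loop_eq fields_and_deps (buildR 0 fields_and_deps PySem.Dict.empty) hR _ _ _ _
    (by rw [lm, List.length_replicate]) hA le_rfl).symm

-- ===== VERDICT (by name: the statement is the Claim_ definition above) =====
theorem get_dependent_fields_spec : Claim_equal_get_dependent_fields := by
  intro fields_and_deps required_fields _
  exact main_eq fields_and_deps required_fields
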